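-- pv_equiv track=rewrite | github.com/mordechaipotash/intellectual-dna | pipelines/build_tool_stack_combos.py | parse_stack_patterns
-- ===== SOURCE A (Python) =====
-- def parse_stack_patterns(text: str) -> list:
--     """Parse tool stack patterns from LLM output."""
--     patterns = []
--     lines = text.split('\n')
--
--     current = {}
--     for line in lines:
--         line = line.strip()
--         if line.startswith('STACK:'):
--             if current and 'stack' in current:
--                 patterns.append(current)
--             current = {'stack': line[6:].strip()}
--         elif line.startswith('DECISION:') and current:
--             current['decision'] = line[9:].strip()
--         elif line.startswith('LAYER:') and current:
--             current['layer'] = line[6:].strip().lower()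
--         elif line.startswith('CONFIDENCE:') and current:
--             current['confidence'] = line[11:].strip().lower()
--
--     if current and 'stack' in current:
--         patterns.append(current)
--
--     return patterns
-- ===== SOURCE B (Python) =====
-- def parse_stack_patterns(text: str) -> list:
--     """Parse tool stack patterns from LLM output.
--
--     Segment-then-build: pass 1 partitions the stripped lines into groups,
--     one per 'STACK:' line (lines before the first 'STACK:' are dropped);
--     pass 2 builds one dict per group.
--     """
--     lines = [ln.strip() for ln in text.split('\n')]
--     n = len(lines)
--     groups = []
--     i = 0
--     while i < n:
--         if lines[i].startswith('STACK:'):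
--             j = i + 1
--             while j < n and not lines[j].startswith('STACK:'):
--                 j += 1
--             groups.append(lines[i:j])
--             i = j
--         else:
--             i += 1
--     return [_build_pattern(g) for g in groups]
--
--
-- def _build_pattern(group):
--     d = {'stack': group[0][6:].strip()}
--     for ln in group[1:]:
--         if ln.startswith('DECISION:'):
--             d['decision'] = ln[9:].strip()
--         elif ln.startswith('LAYER:'):
--             d['layer'] = ln[6:].strip().lower()
--         elif ln.startswith('CONFIDENCE:'):
--             d['confidence'] = ln[11:].strip().lower()
--     return d
-- ===== Notes on version B (the rewrite author's own statement) =====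
-- stated objective: alternative
-- what changed: Replaces A's single accumulator loop (mutable current dict flushed on each STACK line and at the end) with two explicit passes: first segment the stripped lines into groups starting at each STACK: line (discarding lines before the first), then build one dict per group; same values and insertion order.
import Mathlib
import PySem

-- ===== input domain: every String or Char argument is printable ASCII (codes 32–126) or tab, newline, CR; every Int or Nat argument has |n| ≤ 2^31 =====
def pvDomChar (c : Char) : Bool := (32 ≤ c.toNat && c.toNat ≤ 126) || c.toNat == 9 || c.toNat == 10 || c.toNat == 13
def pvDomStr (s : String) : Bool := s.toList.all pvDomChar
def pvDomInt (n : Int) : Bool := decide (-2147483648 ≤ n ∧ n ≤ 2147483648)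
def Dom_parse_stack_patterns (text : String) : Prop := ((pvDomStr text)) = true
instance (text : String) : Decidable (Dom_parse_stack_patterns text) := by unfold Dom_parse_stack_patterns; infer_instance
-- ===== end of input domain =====

-- B re-implements the accumulator loop as two passes (segment lines into STACK-groups, then build one dict per group); same values, alternative decomposition.

-- ===== PORT A =====
-- loop body of A on an already-stripped line
def pvACore (st : List (PySem.Dict String String) × PySem.Dict String String) (line : String) :
    List (PySem.Dict String String) × PySem.Dict String String :=
  if PySem.Str.startswith line "STACK:" then
    let pats := if st.2.size != 0 && st.2.contains "stack" then st.1 ++ [st.2] else st.1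
    (pats, (PySem.Dict.empty).insert "stack" (PySem.Str.strip (PySem.Str.slice line (some 6) none)))
  else if PySem.Str.startswith line "DECISION:" && st.2.size != 0 then
    (st.1, st.2.insert "decision" (PySem.Str.strip (PySem.Str.slice line (some 9) none)))
  else if PySem.Str.startswith line "LAYER:" && st.2.size != 0 then
    (st.1, st.2.insert "layer" (PySem.Str.lower (PySem.Str.strip (PySem.Str.slice line (some 6) none))))
  else if PySem.Str.startswith line "CONFIDENCE:" && st.2.size != 0 then
    (st.1, st.2.insert "confidence" (PySem.Str.lower (PySem.Str.strip (PySem.Str.slice line (some 11) none))))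
  else st

def parse_stack_patterns (text : String) : List (List (String × String)) :=
  let lines := (PySem.Chars.splitOn text.toList ['\n']).map String.ofList  -- text.split('\n'), sep nonempty so exact
  let st := lines.foldl (fun st line => pvACore st (PySem.Str.strip line)) ([], PySem.Dict.empty)
  let patterns := if st.2.size != 0 && st.2.contains "stack" then st.1 ++ [st.2] else st.1
  patterns.map (fun d => d.items)

-- ===== PORT B =====
def pvNotStack (l : String) : Bool := !(PySem.Str.startswith l "STACK:")

-- pass 1: segment stripped lines into groups, one per 'STACK:' line
def pvGroups : List String → List (List String)
  | [] => []
  | l :: rest =>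
    if PySem.Str.startswith l "STACK:" then
      (l :: rest.takeWhile pvNotStack) :: pvGroups (rest.dropWhile pvNotStack)
    else pvGroups rest
termination_by ls => ls.length
decreasing_by
  · have := List.length_dropWhile_le pvNotStack rest
    simp; omega
  · simp

-- pass 2, loop body: one field line of a group's body
def pvBody (d : PySem.Dict String String) (ln : String) : PySem.Dict String String :=
  if PySem.Str.startswith ln "DECISION:" then
    d.insert "decision" (PySem.Str.strip (PySem.Str.slice ln (some 9) none))
  else if PySem.Str.startswith ln "LAYER:" then
    d.insert "layer" (PySem.Str.lower (PySem.Str.strip (PySem.Str.slice ln (some 6) none)))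
  else if PySem.Str.startswith ln "CONFIDENCE:" then
    d.insert "confidence" (PySem.Str.lower (PySem.Str.strip (PySem.Str.slice ln (some 11) none)))
  else d

def pvBuild (g : List String) : PySem.Dict String String :=
  match g with
  | [] => PySem.Dict.empty  -- unreachable: every group starts with its 'STACK:' line
  | h :: body =>
    body.foldl pvBody ((PySem.Dict.empty).insert "stack" (PySem.Str.strip (PySem.Str.slice h (some 6) none)))

def parse_stack_patterns_alt (text : String) : List (List (String × String)) :=
  let lines := ((PySem.Chars.splitOn text.toList ['\n']).map String.ofList).map PySem.Str.strip  -- [ln.strip() for ln in text.split('\n')]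
  (pvGroups lines).map (fun g => (pvBuild g).items)

-- ===== PRECONDITION & SPEC =====
def Spec_parse_stack_patterns (text : String) (out : List (List (String × String))) : Prop := out = parse_stack_patterns_alt text
instance (text : String) (out : List (List (String × String))) : Decidable (Spec_parse_stack_patterns text out) := by unfold Spec_parse_stack_patterns; infer_instance

-- ===== CLAIM (what is proved, stated in full; the proofs are below) =====
def Claim_equal_parse_stack_patterns : Prop := ∀ (text : String), Dom_parse_stack_patterns text → Spec_parse_stack_patterns text (parse_stack_patterns text)

-- ===== LEMMAS AND PROOFS =====

-- A's finalization of the loop state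
def pvFinal (st : List (PySem.Dict String String) × PySem.Dict String String) : List (List (String × String)) :=
  (if st.2.size != 0 && st.2.contains "stack" then st.1 ++ [st.2] else st.1).map (fun d => d.items)

lemma pvGroups_nil : pvGroups [] = [] := by
  rw [pvGroups.eq_def]

lemma pvGroups_cons_stack (l : String) (rest : List String)
    (hs : PySem.Str.startswith l "STACK:" = true) :
    pvGroups (l :: rest) =
      (l :: rest.takeWhile pvNotStack) :: pvGroups (rest.dropWhile pvNotStack) := by
  rw [pvGroups.eq_def]; simp only [hs, if_true]

lemma pvGroups_cons_nonstack (l : String) (rest : List String)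
    (hb : PySem.Str.startswith l "STACK:" = false) :
    pvGroups (l :: rest) = pvGroups rest := by
  rw [pvGroups.eq_def]; simp only [hb, Bool.false_eq_true, if_false]

lemma pvBuild_cons (h : String) (body : List String) :
    pvBuild (h :: body) =
      body.foldl pvBody ((PySem.Dict.empty).insert "stack" (PySem.Str.strip (PySem.Str.slice h (some 6) none))) := rfl

lemma pv_contains_size {d : PySem.Dict String String} (h : d.contains "stack" = true) :
    (d.size != 0) = true := by
  have hne : d.items ≠ [] := by
    intro he
    rw [PySem.Dict.contains_iff_mem_keys] at h
    simp [PySem.Dict.keys, he] at h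
  simp [PySem.Dict.size, List.length_eq_zero_iff, hne]

lemma pv_body_contains (d : PySem.Dict String String) (ln : String)
    (h : d.contains "stack" = true) : (pvBody d ln).contains "stack" = true := by
  unfold pvBody
  split_ifs <;> simp [PySem.Dict.contains_insert, h]

lemma pv_core_nonstack (st : List (PySem.Dict String String) × PySem.Dict String String)
    (ln : String) (hns : PySem.Str.startswith ln "STACK:" = false)
    (hsz : (st.2.size != 0) = true) :
    pvACore st ln = (st.1, pvBody st.2 ln) := by
  obtain ⟨p, c⟩ := st
  simp only at hsz
  simp only [pvACore, pvBody, hns, hsz, Bool.false_eq_true, if_false, Bool.and_true]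
  split_ifs <;> rfl

lemma pv_main (sl : List String) (pats : List (PySem.Dict String String))
    (cur : PySem.Dict String String) (h : cur.contains "stack" = true) :
    pvFinal (sl.foldl pvACore (pats, cur)) =
      pats.map (fun d => d.items) ++
        ((sl.takeWhile pvNotStack).foldl pvBody cur).items ::
          (pvGroups (sl.dropWhile pvNotStack)).map (fun g => (pvBuild g).items) := by
  induction sl generalizing pats cur with
  | nil =>
    simp [pvFinal, pvGroups_nil, h, pv_contains_size h]
  | cons l tl ih =>
    by_cases hs : PySem.Str.startswith l "STACK:" = true
    · have hstep : pvACore (pats, cur) l =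
          (pats ++ [cur],
           (PySem.Dict.empty).insert "stack" (PySem.Str.strip (PySem.Str.slice l (some 6) none))) := by
        simp only [pvACore, hs, pv_contains_size h, h, Bool.and_self, if_true]
      have hns : pvNotStack l = false := by simp only [pvNotStack, hs, Bool.not_true]
      rw [List.foldl_cons, hstep,
        ih _ _ (PySem.Dict.contains_insert_self _ _ _),
        List.takeWhile_cons, List.dropWhile_cons, hns]
      simp only [Bool.false_eq_true, if_false, List.foldl_nil,
        pvGroups_cons_stack l tl hs, List.map_cons, List.map_append, List.map_nil,
        pvBuild_cons]
      simp
    · have hb : PySem.Str.startswith l "STACK:" = false := by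
        cases hxs : PySem.Str.startswith l "STACK:" with
        | true => exact absurd hxs hs
        | false => rfl
      have hns : pvNotStack l = true := by simp only [pvNotStack, hb, Bool.not_false]
      rw [List.foldl_cons, pv_core_nonstack (pats, cur) l hb (pv_contains_size h),
        ih _ _ (pv_body_contains cur l h),
        List.takeWhile_cons, List.dropWhile_cons, hns]
      simp only [if_true, List.foldl_cons]

lemma pv_init (sl : List String) :
    pvFinal (sl.foldl pvACore ([], PySem.Dict.empty)) =
      (pvGroups sl).map (fun g => (pvBuild g).items) := by
  induction sl with
  | nil => simp [pvFinal, pvGroups_nil, PySem.Dict.size_empty]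
  | cons l tl ih =>
    by_cases hs : PySem.Str.startswith l "STACK:" = true
    · have hstep : pvACore ([], PySem.Dict.empty) l =
          ([], (PySem.Dict.empty).insert "stack" (PySem.Str.strip (PySem.Str.slice l (some 6) none))) := by
        simp only [pvACore, hs, if_true, PySem.Dict.size_empty]
        norm_num
      rw [List.foldl_cons, hstep,
        pv_main tl [] _ (PySem.Dict.contains_insert_self _ _ _),
        pvGroups_cons_stack l tl hs]
      simp only [List.map_cons, List.map_nil, List.nil_append, pvBuild_cons]
    · have hb : PySem.Str.startswith l "STACK:" = false := by
        cases hxs : PySem.Str.startswith l "STACK:" with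
        | true => exact absurd hxs hs
        | false => rfl
      have hstep : pvACore ([], PySem.Dict.empty) l = ([], PySem.Dict.empty) := by
        simp only [pvACore, hb, PySem.Dict.size_empty, Bool.false_eq_true, if_false]
        norm_num
      rw [List.foldl_cons, hstep, ih, pvGroups_cons_nonstack l tl hb]

-- ===== VERDICT (by name: the statement is the Claim_ definition above) =====
theorem parse_stack_patterns_spec : Claim_equal_parse_stack_patterns := by
  intro text _
  have h := pv_init (((PySem.Chars.splitOn text.toList ['\n']).map String.ofList).map PySem.Str.strip)
  rw [List.foldl_map] at h
  exact h
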